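-- pv_equiv track=rewrite | github.com/micyen/VisAR | backend/preproc.py | getWtGrp
-- ===== SOURCE A (Python) =====
-- def getWtGrp(wt):
--     weights =["under 40 kg","40 to 80 kg","80 to 120 kg"]
--     wt_ranges = [40,80,120]
--     if wt<=0:
--         return "Unknown Weight"
--     for x in range(len(wt_ranges)):
--         if wt<wt_ranges[x]:
--             return weights[x]
--     return  "120+ kg"
-- ===== SOURCE B (Python) =====
-- import bisect
--
-- def getWtGrp(wt):
--     if wt <= 0:
--         return "Unknown Weight"
--     labels = ["under 40 kg", "40 to 80 kg", "80 to 120 kg", "120+ kg"]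
--     return labels[bisect.bisect_right([40, 80, 120], wt)]
-- ===== Notes on version B (the rewrite author's own statement) =====
-- stated objective: idiomatic
-- what changed: Replaces the sequential index loop over thresholds with a binary-search table lookup (bisect_right into a precomputed label list) after the non-positive-weight guard.
import Mathlib
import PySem

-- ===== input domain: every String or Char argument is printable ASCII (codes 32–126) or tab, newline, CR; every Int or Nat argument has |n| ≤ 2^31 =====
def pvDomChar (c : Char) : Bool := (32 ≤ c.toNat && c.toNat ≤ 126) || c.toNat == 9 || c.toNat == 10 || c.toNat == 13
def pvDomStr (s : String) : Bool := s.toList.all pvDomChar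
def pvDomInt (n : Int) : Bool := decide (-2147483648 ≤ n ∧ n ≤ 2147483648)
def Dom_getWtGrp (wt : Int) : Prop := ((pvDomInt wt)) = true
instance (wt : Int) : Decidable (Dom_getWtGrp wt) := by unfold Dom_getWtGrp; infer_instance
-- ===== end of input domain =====

-- B replaces A's sequential scan over the thresholds by a binary-search table lookup (bisect_right); idiomatic, same values.

-- ===== PORT A =====
-- the 'for x in range(len(wt_ranges))' loop with early return, transliterated as recursion over the index list
def getWtGrpLoop (wt : Int) (weights : List String) (wt_ranges : List Int) : List Nat → String
  | [] => "120+ kg"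
  | x :: rest =>
      match PySem.List.pyGet? wt_ranges (Int.ofNat x) with
      | some r => if wt < r then (PySem.List.pyGet? weights (Int.ofNat x)).getD "" else getWtGrpLoop wt weights wt_ranges rest
      | none => ""   -- unreachable: x < len(wt_ranges)

def getWtGrp (wt : Int) : String :=
  let weights := ["under 40 kg", "40 to 80 kg", "80 to 120 kg"]
  let wt_ranges : List Int := [40, 80, 120]
  if wt ≤ 0 then "Unknown Weight"
  else getWtGrpLoop wt weights wt_ranges (List.range wt_ranges.length)

-- ===== PORT B =====
-- bisect.bisect_right: binary search, recursion on hi - lo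
def bisectRight (a : List Int) (x : Int) (lo hi : Nat) : Nat :=
  if _h : lo < hi then
    let mid := (lo + hi) / 2
    if x < (PySem.List.pyGet? a (Int.ofNat mid)).getD 0 then bisectRight a x lo mid
    else bisectRight a x (mid + 1) hi
  else lo
termination_by hi - lo
decreasing_by all_goals omega

def getWtGrp_alt (wt : Int) : String :=
  if wt ≤ 0 then "Unknown Weight"
  else
    let labels := ["under 40 kg", "40 to 80 kg", "80 to 120 kg", "120+ kg"]
    let thresholds : List Int := [40, 80, 120]
    (PySem.List.pyGet? labels (Int.ofNat (bisectRight thresholds wt 0 thresholds.length))).getD ""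

-- ===== PRECONDITION & SPEC =====
def Spec_getWtGrp (wt : Int) (out : String) : Prop := out = getWtGrp_alt wt
instance (wt : Int) (out : String) : Decidable (Spec_getWtGrp wt out) := by unfold Spec_getWtGrp; infer_instance

-- ===== CLAIM (what is proved, stated in full; the proofs are below) =====
def Claim_equal_getWtGrp : Prop := ∀ (wt : Int), Dom_getWtGrp wt → Spec_getWtGrp wt (getWtGrp wt)

-- ===== LEMMAS AND PROOFS =====

-- ===== VERDICT (by name: the statement is the Claim_ definition above) =====
theorem getWtGrp_spec : Claim_equal_getWtGrp := by
  intro wt _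
  unfold Spec_getWtGrp getWtGrp getWtGrp_alt
  by_cases h0 : wt ≤ 0
  · simp [h0]
  · by_cases h1 : wt < 40
    · have h2 : wt < 80 := by omega
      simp [h0, h1, h2, getWtGrpLoop, bisectRight, List.range, List.range.loop]
    · by_cases h2 : wt < 80
      · simp [h0, h1, h2, getWtGrpLoop, bisectRight, List.range, List.range.loop]
      · by_cases h3 : wt < 120
        · have h1' : ¬ wt < 40 := by omega
          simp [h0, h1', h2, h3, getWtGrpLoop, bisectRight, List.range, List.range.loop]
        · have h1' : ¬ wt < 40 := by omega
          simp [h0, h1', h2, h3, getWtGrpLoop, bisectRight, List.range, List.range.loop]
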